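-- pv_equiv track=rewrite | github.com/dna-storage/framed | dnastorage/codec/base_conversion.py | convertTernaryHelper
-- ===== SOURCE A (Python) =====
-- bases = ['A', 'C', 'G', 'T']
--
-- def convertTernaryHelper(dec,s):
--     m = dec % 3
--     q = dec // 3
--     s = s + bases[m]
--     if q > 0:
--         return convertTernaryHelper(q,s)
--     else:
--         return s
-- ===== SOURCE B (Python) =====
-- bases = ['A', 'C', 'G', 'T']
--
-- def convertTernaryHelper(dec, s):
--     # Collect ternary digits first (do-while: at least one digit), then map to bases and join.
--     digits = []
--     while True:
--         digits.append(dec % 3)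
--         q = dec // 3
--         if q <= 0:
--             break
--         dec = q
--     return s + ''.join(bases[d] for d in digits)
-- ===== Notes on version B (the rewrite author's own statement) =====
-- stated objective: alternative
-- what changed: Replaces A's string-accumulating recursion with a do-while loop that first collects the ternary digit list, then maps digits to bases and joins them onto s.
import Mathlib
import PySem

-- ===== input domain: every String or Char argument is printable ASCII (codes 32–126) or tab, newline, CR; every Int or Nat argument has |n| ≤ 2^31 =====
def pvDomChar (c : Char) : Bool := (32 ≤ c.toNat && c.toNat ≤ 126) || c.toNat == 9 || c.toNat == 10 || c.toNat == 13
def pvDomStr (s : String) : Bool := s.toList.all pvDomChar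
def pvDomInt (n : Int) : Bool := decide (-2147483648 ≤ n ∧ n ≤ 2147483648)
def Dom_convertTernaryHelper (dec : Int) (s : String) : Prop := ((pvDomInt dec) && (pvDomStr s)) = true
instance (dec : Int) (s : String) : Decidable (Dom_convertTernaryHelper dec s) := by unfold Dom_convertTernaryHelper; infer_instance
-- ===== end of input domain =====

-- B is a different decomposition: it first collects the ternary digit list with a do-while loop,
-- then maps digits to bases and joins, instead of A's recursion that appends one base per call.


def pvBases : List String := ["A", "C", "G", "T"]

-- ===== PORT A =====
-- bases[m] with m = dec % 3 ∈ {0,1,2}, always in range, so pyGetD with default "" is exact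
def convertTernaryHelper (dec : Int) (s : String) : String :=
  let m := PySem.Int.mod dec 3
  let q := PySem.Int.floordiv dec 3
  let s' := s ++ PySem.List.pyGetD pvBases m ""
  if q > 0 then convertTernaryHelper q s' else s'
termination_by dec.toNat
decreasing_by
  rename_i h
  simp only [q, PySem.Int.floordiv_eq_ediv_of_pos (by omega : (0:Int) < 3)] at h ⊢
  omega

-- ===== PORT B =====
-- the do-while loop of Source B collecting digits front-to-back
def pvTernaryDigits (dec : Int) : List Int :=
  let m := PySem.Int.mod dec 3
  let q := PySem.Int.floordiv dec 3
  if q > 0 then m :: pvTernaryDigits q else [m]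
termination_by dec.toNat
decreasing_by
  rename_i h
  simp only [q, PySem.Int.floordiv_eq_ediv_of_pos (by omega : (0:Int) < 3)] at h ⊢
  omega

def convertTernaryHelper_alt (dec : Int) (s : String) : String :=
  s ++ String.join ((pvTernaryDigits dec).map (fun d => PySem.List.pyGetD pvBases d ""))

-- ===== PRECONDITION & SPEC =====
def Spec_convertTernaryHelper (dec : Int) (s : String) (out : String) : Prop := out = convertTernaryHelper_alt dec s
instance (dec : Int) (s : String) (out : String) : Decidable (Spec_convertTernaryHelper dec s out) := by unfold Spec_convertTernaryHelper; infer_instance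

-- ===== CLAIM (what is proved, stated in full; the proofs are below) =====
def Claim_equal_convertTernaryHelper : Prop := ∀ (dec : Int) (s : String), Dom_convertTernaryHelper dec s → Spec_convertTernaryHelper dec s (convertTernaryHelper dec s)

-- ===== LEMMAS AND PROOFS =====
theorem join_cons (a : String) (l : List String) :
    String.join (a :: l) = a ++ String.join l := by
  simp only [String.join, List.foldl_cons, String.empty_append]
  induction l generalizing a with
  | nil => simp
  | cons b l ih =>
    simp only [List.foldl_cons, String.empty_append]
    rw [ih (a ++ b), ih b, String.append_assoc]

theorem convertTernaryHelper_eq_alt (dec : Int) (s : String) :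
    convertTernaryHelper dec s = convertTernaryHelper_alt dec s := by
  unfold convertTernaryHelper_alt
  rw [convertTernaryHelper, pvTernaryDigits]
  split_ifs with h
  · rw [convertTernaryHelper_eq_alt (PySem.Int.floordiv dec 3)]
    unfold convertTernaryHelper_alt
    rw [List.map_cons, join_cons, ← String.append_assoc]
  · rw [List.map_cons, List.map_nil, join_cons]
    simp [String.join]
termination_by dec.toNat
decreasing_by
  simp only [PySem.Int.floordiv_eq_ediv_of_pos (by omega : (0:Int) < 3)] at h ⊢
  omega

-- ===== VERDICT (by name: the statement is the Claim_ definition above) =====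
theorem convertTernaryHelper_spec : Claim_equal_convertTernaryHelper := by
  intro dec s _
  exact convertTernaryHelper_eq_alt dec s
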